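-- pv_equiv track=rewrite | github.com/esajane/digi | anim.py | pseudoternary
-- ===== SOURCE A (Python) =====
-- bit_duration = 1
--
-- sample_rate = 1000
--
-- def pseudoternary(binary_data, initial_high):
--     signal = []
--     last_nonzero = 1 if initial_high else -1
--     for bit in binary_data:
--         if bit == '0':
--             last_nonzero *= -1
--             signal.extend([last_nonzero] * int(bit_duration * sample_rate))
--         else:
--             signal.extend([0] * int(bit_duration * sample_rate))
--     return signal
-- ===== SOURCE B (Python) =====
-- bit_duration = 1
--
-- sample_rate = 1000
--
-- def pseudoternary(binary_data, initial_high):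
--     n = int(bit_duration * sample_rate)
--     # start from an all-zero sample buffer: non-'0' bits need no work at all
--     samples = [0] * (n * len(binary_data))
--     # the k-th '0' bit (0-based) carries level -init, init, -init, ... by parity of k;
--     # overwrite just those segments in place
--     init = 1 if initial_high else -1
--     zero_positions = [i for i, bit in enumerate(binary_data) if bit == '0']
--     for k, pos in enumerate(zero_positions):
--         level = -init if k % 2 == 0 else init
--         samples[pos * n:(pos + 1) * n] = [level] * n
--     return samples
-- ===== Notes on version B (the rewrite author's own statement) =====
-- stated objective: alternative
-- what changed: Instead of A's single stateful pass that toggles a sign variable and extends the output by 1000 samples per bit, B preallocates an all-zero sample buffer, collects the positions of '0' bits, and overwrites only those segments with parity-alternating levels via slice assignment; non-'0' bits need no work.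
import Mathlib
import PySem

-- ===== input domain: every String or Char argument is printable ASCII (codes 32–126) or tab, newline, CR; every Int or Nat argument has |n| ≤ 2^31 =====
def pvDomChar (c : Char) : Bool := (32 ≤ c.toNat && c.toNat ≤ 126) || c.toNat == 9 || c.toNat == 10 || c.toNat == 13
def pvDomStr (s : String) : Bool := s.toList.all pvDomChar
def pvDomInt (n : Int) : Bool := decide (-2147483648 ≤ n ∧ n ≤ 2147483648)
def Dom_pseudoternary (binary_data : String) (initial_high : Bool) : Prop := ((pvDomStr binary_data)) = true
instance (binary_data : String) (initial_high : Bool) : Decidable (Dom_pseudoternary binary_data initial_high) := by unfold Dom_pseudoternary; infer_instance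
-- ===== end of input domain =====

-- B replaces A's stateful emit loop with a preallocated all-zero signal patched only at the
-- '0'-bit segments (parity-alternating levels); B mutates only its own fresh list.

-- ===== PORT A =====
-- A's loop: state = (signal so far, last_nonzero); int(bit_duration * sample_rate) = int(1*1000) = 1000
def pseudoternaryLoop : List Char → List Int → Int → List Int
  | [], signal, _ => signal
  | bit :: rest, signal, last_nonzero =>
    if bit = '0' then
      pseudoternaryLoop rest (signal ++ List.replicate 1000 (last_nonzero * (-1))) (last_nonzero * (-1))
    else
      pseudoternaryLoop rest (signal ++ List.replicate 1000 0) last_nonzero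

def pseudoternary (binary_data : String) (initial_high : Bool) : List Int :=
  pseudoternaryLoop binary_data.toList [] (if initial_high then 1 else -1)

-- ===== PORT B =====
-- Source B's comprehension [i for i, bit in enumerate(binary_data) if bit == '0']: the running
-- enumerate index is the Nat argument
def zeroPosAux : Nat → List Char → List Nat
  | _, [] => []
  | i, bit :: rest => if bit = '0' then i :: zeroPosAux (i + 1) rest else zeroPosAux (i + 1) rest

-- Python slice assignment signal[a:a+len(seg)] = seg (hand port, exact here: a and the slice
-- end are always ≤ len(signal) in Source B, so it is take/replace/drop)
def setSlice (sig : List Int) (a : Nat) (seg : List Int) : List Int :=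
  sig.take a ++ seg ++ sig.drop (a + seg.length)

-- Source B's `for k, pos in enumerate(zero_positions)` loop; k is the enumerate counter
def patchLoop (init : Int) : Nat → List Nat → List Int → List Int
  | _, [], sig => sig
  | k, pos :: rest, sig =>
    patchLoop init (k + 1) rest
      (setSlice sig (pos * 1000) (List.replicate 1000 (if k % 2 = 0 then -init else init)))

def pseudoternary_alt (binary_data : String) (initial_high : Bool) : List Int :=
  let n : Nat := 1000
  let bits := binary_data.toList
  let signal := List.replicate (n * bits.length) 0
  let init : Int := if initial_high then 1 else -1
  let zero_positions := zeroPosAux 0 bits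
  patchLoop init 0 zero_positions signal

-- ===== PRECONDITION & SPEC =====
def Spec_pseudoternary (binary_data : String) (initial_high : Bool) (out : List Int) : Prop := out = pseudoternary_alt binary_data initial_high
instance (binary_data : String) (initial_high : Bool) (out : List Int) : Decidable (Spec_pseudoternary binary_data initial_high out) := by unfold Spec_pseudoternary; infer_instance

-- ===== CLAIM (what is proved, stated in full; the proofs are below) =====
def Claim_equal_pseudoternary : Prop := ∀ (binary_data : String) (initial_high : Bool), Dom_pseudoternary binary_data initial_high → Spec_pseudoternary binary_data initial_high (pseudoternary binary_data initial_high)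

-- ===== LEMMAS AND PROOFS =====

-- per-bit symbols with the running sign threaded through (proof-only abstraction)
def symA : List Char → Int → List Int
  | [], _ => []
  | b :: rest, s => if b = '0' then (-s) :: symA rest (-s) else 0 :: symA rest s

-- patchLoop with the parity test replaced by the running sign (proof-only abstraction)
def goPatch : Int → List Nat → List Int → List Int
  | _, [], sig => sig
  | cur, pos :: rest, sig =>
    goPatch (-cur) rest (setSlice sig (pos * 1000) (List.replicate 1000 (-cur)))

theorem take_append_len {α : Type} (l1 l2 : List α) (n : Nat) :
    (l1 ++ l2).take (l1.length + n) = l1 ++ l2.take n := by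
  rw [List.take_append, List.take_of_length_le (by omega), Nat.add_sub_cancel_left]

theorem drop_append_len {α : Type} (l1 l2 : List α) (n : Nat) :
    (l1 ++ l2).drop (l1.length + n) = l2.drop n := by
  rw [List.drop_append, List.drop_of_length_le (by omega), Nat.add_sub_cancel_left,
    List.nil_append]

theorem symA_loop (bits : List Char) :
    ∀ (last : Int) (signal : List Int),
      pseudoternaryLoop bits signal last =
        signal ++ (symA bits last).flatMap (fun s => List.replicate 1000 s) := by
  induction bits with
  | nil =>
    intro last signal
    simp only [pseudoternaryLoop, symA, List.flatMap_nil, List.append_nil]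
  | cons b rest ih =>
    intro last signal
    by_cases hb : b = '0'
    · have h1 : last * (-1) = -last := by ring
      simp only [pseudoternaryLoop, symA, if_pos hb, h1]
      rw [ih (-last), List.flatMap_cons, List.append_assoc]
    · simp only [pseudoternaryLoop, symA, if_neg hb]
      rw [ih last, List.flatMap_cons, List.append_assoc]

theorem zeroPosAux_succ (bits : List Char) :
    ∀ i : Nat, zeroPosAux (i + 1) bits = (zeroPosAux i bits).map Nat.succ := by
  induction bits with
  | nil => intro i; simp only [zeroPosAux, List.map_nil]
  | cons b rest ih =>
    intro i
    by_cases hb : b = '0'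
    · simp only [zeroPosAux, if_pos hb, ih (i + 1), ih i, List.map_cons, Nat.succ_eq_add_one]
    · simp only [zeroPosAux, if_neg hb, ih (i + 1), ih i]

theorem patchLoop_goPatch (init : Int) (ps : List Nat) :
    ∀ (k : Nat) (sig : List Int),
      patchLoop init k ps sig = goPatch (if k % 2 = 0 then init else -init) ps sig := by
  induction ps with
  | nil => intro k sig; simp only [patchLoop, goPatch]
  | cons p rest ih =>
    intro k sig
    by_cases h0 : k % 2 = 0
    · have h1 : (k + 1) % 2 ≠ 0 := by omega
      simp only [patchLoop, goPatch, if_pos h0, ih (k + 1), if_neg h1]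
    · have h1 : (k + 1) % 2 = 0 := by omega
      simp only [patchLoop, goPatch, if_neg h0, ih (k + 1), if_pos h1, neg_neg]

theorem setSlice_shift (blk sig seg : List Int) (p : Nat) (hblk : blk.length = 1000) :
    setSlice (blk ++ sig) ((p + 1) * 1000) seg = blk ++ setSlice sig (p * 1000) seg := by
  unfold setSlice
  have h2 : (p + 1) * 1000 + seg.length = blk.length + (p * 1000 + seg.length) := by
    rw [hblk]; ring
  have h1 : (p + 1) * 1000 = blk.length + p * 1000 := by rw [hblk]; ring
  rw [h2, drop_append_len, h1, take_append_len]
  simp only [List.append_assoc]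

theorem setSlice_zero (blk sig seg : List Int) (h : seg.length = blk.length) :
    setSlice (blk ++ sig) 0 seg = seg ++ sig := by
  unfold setSlice
  rw [List.take_zero, List.nil_append, Nat.zero_add, h, List.drop_left]

theorem goPatch_shift (ps : List Nat) :
    ∀ (cur : Int) (blk sig : List Int), blk.length = 1000 →
      goPatch cur (ps.map Nat.succ) (blk ++ sig) = blk ++ goPatch cur ps sig := by
  induction ps with
  | nil => intro cur blk sig _; simp only [List.map_nil, goPatch]
  | cons p rest ih =>
    intro cur blk sig hblk
    simp only [List.map_cons, goPatch, Nat.succ_eq_add_one]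
    rw [setSlice_shift blk sig _ p hblk, ih (-cur) blk _ hblk]

theorem goPatch_symA (bits : List Char) :
    ∀ cur : Int,
      goPatch cur (zeroPosAux 0 bits) (List.replicate (1000 * bits.length) 0) =
        (symA bits cur).flatMap (fun s => List.replicate 1000 s) := by
  induction bits with
  | nil =>
    intro cur
    simp only [zeroPosAux, goPatch, symA, List.flatMap_nil, List.length_nil, Nat.mul_zero,
      List.replicate_zero]
  | cons b rest ih =>
    intro cur
    have hrep : List.replicate (1000 * (b :: rest).length) (0 : Int) =
        List.replicate 1000 0 ++ List.replicate (1000 * rest.length) 0 := by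
      rw [← List.replicate_add]
      congr 1
      simp only [List.length_cons]
      ring
    rw [hrep]
    by_cases hb : b = '0'
    · simp only [zeroPosAux, if_pos hb, zeroPosAux_succ, goPatch, Nat.zero_mul]
      rw [setSlice_zero _ _ _ (by rw [List.length_replicate, List.length_replicate])]
      rw [goPatch_shift (zeroPosAux 0 rest) (-cur) _ _ (by rw [List.length_replicate]), ih (-cur)]
      simp only [symA, if_pos hb, List.flatMap_cons]
    · simp only [zeroPosAux, if_neg hb, zeroPosAux_succ]
      rw [goPatch_shift (zeroPosAux 0 rest) cur _ _ (by rw [List.length_replicate]), ih cur]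
      simp only [symA, if_neg hb, List.flatMap_cons]

-- ===== VERDICT (by name: the statement is the Claim_ definition above) =====
theorem pseudoternary_spec : Claim_equal_pseudoternary := by
  intro binary_data initial_high _
  unfold Spec_pseudoternary pseudoternary pseudoternary_alt
  rw [symA_loop, patchLoop_goPatch]
  simp only [Nat.zero_mod, List.nil_append, if_true]
  exact (goPatch_symA binary_data.toList _).symm
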